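-- pv_equiv track=rewrite | github.com/rayyanrizvi10/CISC-121-Linear-Search-App | app.py | run_linear_search
-- ===== SOURCE A (Python) =====
-- def linear_search_steps(arr, target):
--     steps = []
--     for i, value in enumerate(arr):
--         if value == target:
--             steps.append(f"Step {i+1}: Compare target {target} with arr[{i}] = {value} → FOUND ✅")
--             result = f"Result: Found {target} at index {i}.\n\n"
--             return result + "\n".join(steps)
--         else:
--             steps.append(f"Step {i+1}: Compare target {target} with arr[{i}] = {value} → not equal ❌")
--
--     result = f"Result: {target} was NOT found in the list.\n\n"
--     return result + "\n".join(steps)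
--
-- def run_linear_search(list_str, target_str):
--     # Parse and validate list
--     try:
--         numbers = [int(x.strip()) for x in list_str.split(",") if x.strip() != ""]
--     except ValueError:
--         return "❗ Error: please enter only integers separated by commas, e.g. 4, 2, 7, 9, 1"
--
--     if len(numbers) == 0:
--         return "❗ Error: your list is empty. Please enter at least one number."
--
--     # Parse and validate target
--     try:
--         target = int(target_str.strip())
--     except ValueError:
--         return "❗ Error: target must be a single integer, e.g. 7"
--
--     return linear_search_steps(numbers, target)
-- ===== SOURCE B (Python) =====
-- def run_linear_search(list_str, target_str):
--     # Parse and validate list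
--     try:
--         numbers = [int(x.strip()) for x in list_str.split(",") if x.strip() != ""]
--     except ValueError:
--         return "❗ Error: please enter only integers separated by commas, e.g. 4, 2, 7, 9, 1"
--
--     if len(numbers) == 0:
--         return "❗ Error: your list is empty. Please enter at least one number."
--
--     # Parse and validate target
--     try:
--         target = int(target_str.strip())
--     except ValueError:
--         return "❗ Error: target must be a single integer, e.g. 7"
--
--     # Find the first match position in one scan, then format the log in a second pass.
--     def line(i, v, tag):
--         return f"Step {i+1}: Compare target {target} with arr[{i}] = {v} → {tag}"
--
--     idx = next((i for i, v in enumerate(numbers) if v == target), None)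
--     if idx is None:
--         header = f"Result: {target} was NOT found in the list.\n\n"
--         lines = [line(i, v, "not equal ❌") for i, v in enumerate(numbers)]
--     else:
--         header = f"Result: Found {target} at index {idx}.\n\n"
--         lines = [line(i, v, "not equal ❌") for i, v in enumerate(numbers[:idx])] + [line(idx, target, "FOUND ✅")]
--     return header + "\n".join(lines)
-- ===== Notes on version B (the rewrite author's own statement) =====
-- stated objective: alternative
-- what changed: Replaces A's single stateful loop (appending steps and early-returning on a hit) by a find-then-format split: one scan computes the first match index, then the header and the step lines are built by comprehensions over the prefix.
import Mathlib
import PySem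

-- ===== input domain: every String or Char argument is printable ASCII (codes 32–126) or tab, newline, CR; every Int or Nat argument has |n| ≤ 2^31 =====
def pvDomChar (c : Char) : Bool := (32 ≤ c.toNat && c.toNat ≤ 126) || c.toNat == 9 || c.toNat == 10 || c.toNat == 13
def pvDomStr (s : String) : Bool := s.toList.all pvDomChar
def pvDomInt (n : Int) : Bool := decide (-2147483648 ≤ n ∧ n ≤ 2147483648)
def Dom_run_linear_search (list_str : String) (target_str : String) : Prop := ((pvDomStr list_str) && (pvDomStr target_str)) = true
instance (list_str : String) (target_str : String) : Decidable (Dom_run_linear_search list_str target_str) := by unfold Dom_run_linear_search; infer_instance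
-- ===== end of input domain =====

-- B replaces A's single stateful loop (append steps, early return on a hit) by a find-then-format
-- split: one scan finds the first match index, a second pass formats the log (objective: alternative).
-- Shared parse/validate glue (identical in both Pythons):
-- s.split(",") is PySem.Str.split? (some: sep "," is nonempty); [int(x.strip()) for x in list_str.split(",") if x.strip() != ""]  (none = ValueError somewhere)
def pvParseInts : List String → Option (List Int)
  | [] => some []
  | x :: rest =>
    if PySem.Str.strip x ≠ "" then
      match PySem.Int.ofStr? (PySem.Str.strip x) with
      | none => none
      | some n =>
        match pvParseInts rest with
        | none => none
        | some ns => some (n :: ns)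
    else pvParseInts rest

-- ===== PORT A =====
-- the for-loop of linear_search_steps over enumerate(arr), carrying the accumulated steps list
def linear_search_steps_loop (target : Int) : List (Int × Int) → List String → String
  | [], steps =>
      ("Result: " ++ PySem.Int.toStr target ++ " was NOT found in the list.\n\n") ++
        PySem.Str.join "\n" steps
  | (i, value) :: rest, steps =>
      if value == target then
        ("Result: Found " ++ PySem.Int.toStr target ++ " at index " ++ PySem.Int.toStr i ++ ".\n\n") ++
          PySem.Str.join "\n" (steps ++
            ["Step " ++ PySem.Int.toStr (i + 1) ++ ": Compare target " ++ PySem.Int.toStr target ++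
              " with arr[" ++ PySem.Int.toStr i ++ "] = " ++ PySem.Int.toStr value ++ " → FOUND ✅"])
      else
        linear_search_steps_loop target rest (steps ++
          ["Step " ++ PySem.Int.toStr (i + 1) ++ ": Compare target " ++ PySem.Int.toStr target ++
            " with arr[" ++ PySem.Int.toStr i ++ "] = " ++ PySem.Int.toStr value ++ " → not equal ❌"])

def linear_search_steps (arr : List Int) (target : Int) : String :=
  linear_search_steps_loop target (PySem.List.enumerate arr 0) []

def run_linear_search (list_str : String) (target_str : String) : String :=
  match pvParseInts (((PySem.Str.split? list_str ",").getD [])) with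
  | none => "❗ Error: please enter only integers separated by commas, e.g. 4, 2, 7, 9, 1"
  | some numbers =>
    if PySem.List.len numbers == 0 then
      "❗ Error: your list is empty. Please enter at least one number."
    else
      match PySem.Int.ofStr? (PySem.Str.strip target_str) with
      | none => "❗ Error: target must be a single integer, e.g. 7"
      | some target => linear_search_steps numbers target

-- ===== PORT B =====
-- line(i, v, tag) of Source B
def pvLine (target i v : Int) (tag : String) : String :=
  "Step " ++ PySem.Int.toStr (i + 1) ++ ": Compare target " ++ PySem.Int.toStr target ++
    " with arr[" ++ PySem.Int.toStr i ++ "] = " ++ PySem.Int.toStr v ++ " → " ++ tag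

-- idx = next((i for i, v in enumerate(numbers) if v == target), None), then format
def pvSearchLog (numbers : List Int) (target : Int) : String :=
  match ((PySem.List.enumerate numbers 0).find? (fun p => p.2 == target)).map (·.1) with
  | none =>
      ("Result: " ++ PySem.Int.toStr target ++ " was NOT found in the list.\n\n") ++
        PySem.Str.join "\n"
          ((PySem.List.enumerate numbers 0).map (fun p => pvLine target p.1 p.2 "not equal ❌"))
  | some idx =>
      ("Result: Found " ++ PySem.Int.toStr target ++ " at index " ++ PySem.Int.toStr idx ++ ".\n\n") ++
        PySem.Str.join "\n"
          (((PySem.List.enumerate (PySem.List.slice numbers none (some idx)) 0).map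
              (fun p => pvLine target p.1 p.2 "not equal ❌")) ++
            [pvLine target idx target "FOUND ✅"])

def run_linear_search_alt (list_str : String) (target_str : String) : String :=
  match pvParseInts (((PySem.Str.split? list_str ",").getD [])) with
  | none => "❗ Error: please enter only integers separated by commas, e.g. 4, 2, 7, 9, 1"
  | some numbers =>
    if PySem.List.len numbers == 0 then
      "❗ Error: your list is empty. Please enter at least one number."
    else
      match PySem.Int.ofStr? (PySem.Str.strip target_str) with
      | none => "❗ Error: target must be a single integer, e.g. 7"
      | some target => pvSearchLog numbers target

-- ===== PRECONDITION & SPEC =====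
def Spec_run_linear_search (list_str : String) (target_str : String) (out : String) : Prop := out = run_linear_search_alt list_str target_str
instance (list_str : String) (target_str : String) (out : String) : Decidable (Spec_run_linear_search list_str target_str out) := by unfold Spec_run_linear_search; infer_instance

-- ===== CLAIM (what is proved, stated in full; the proofs are below) =====
def Claim_equal_run_linear_search : Prop := ∀ (list_str : String) (target_str : String), Dom_run_linear_search list_str target_str → Spec_run_linear_search list_str target_str (run_linear_search list_str target_str)

-- ===== LEMMAS AND PROOFS =====

-- reassociate a trailing literal tag onto a built prefix
theorem pv_tag_found (x : String) : x ++ " → FOUND ✅" = (x ++ " → ") ++ "FOUND ✅" := by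
  rw [String.append_assoc]; rfl

theorem pv_tag_ne (x : String) : x ++ " → not equal ❌" = (x ++ " → ") ++ "not equal ❌" := by
  rw [String.append_assoc]; rfl

-- A's loop over any enumerate suffix, characterised by find?/takeWhile
theorem pv_loop_eq (t : Int) (xs : List Int) : ∀ (s : Int) (acc : List String),
    linear_search_steps_loop t (PySem.List.enumerate xs s) acc =
    match ((PySem.List.enumerate xs s).find? (fun p => p.2 == t)) with
    | none =>
        ("Result: " ++ PySem.Int.toStr t ++ " was NOT found in the list.\n\n") ++
          PySem.Str.join "\n"
            (acc ++ (PySem.List.enumerate xs s).map (fun p => pvLine t p.1 p.2 "not equal ❌"))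
    | some p =>
        ("Result: Found " ++ PySem.Int.toStr t ++ " at index " ++ PySem.Int.toStr p.1 ++ ".\n\n") ++
          PySem.Str.join "\n"
            (acc ++ (PySem.List.enumerate (xs.takeWhile (fun v => !(v == t))) s).map
                (fun p => pvLine t p.1 p.2 "not equal ❌") ++
              [pvLine t p.1 t "FOUND ✅"]) := by
  induction xs with
  | nil => intro s acc; simp [PySem.List.enumerate, linear_search_steps_loop]
  | cons x xs ih =>
    intro s acc
    rw [PySem.List.enumerate_cons]
    by_cases hx : x = t
    · subst hx
      simp [linear_search_steps_loop, List.find?, List.takeWhile, pvLine, pv_tag_found]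
    · have hb : (x == t) = false := by simp [hx]
      simp only [linear_search_steps_loop, hb, List.find?, List.takeWhile, Bool.not_false]
      rw [ih (s + 1)]
      cases hf : (PySem.List.enumerate xs (s + 1)).find? (fun p => p.2 == t) with
      | none =>
          simp [pvLine, pv_tag_ne, List.append_assoc]
      | some p =>
          simp [pvLine, pv_tag_ne, List.append_assoc]

-- a successful find? on enumerate: value is the target, index = length of the unequal prefix
theorem pv_find_enum (t : Int) (xs : List Int) : ∀ (s : Int) (p : Int × Int),
    (PySem.List.enumerate xs s).find? (fun q => q.2 == t) = some p →
    p.2 = t ∧ p.1 = s + ((xs.takeWhile (fun v => !(v == t))).length : Int) := by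
  induction xs with
  | nil => intro s p h; simp [PySem.List.enumerate] at h
  | cons x xs ih =>
    intro s p h
    rw [PySem.List.enumerate_cons] at h
    by_cases hx : x = t
    · subst hx
      simp [List.find?] at h
      simp [List.takeWhile, ← h]
    · have hb : (x == t) = false := by simp [hx]
      simp only [List.find?, hb] at h
      obtain ⟨h1, h2⟩ := ih (s + 1) p h
      refine ⟨h1, ?_⟩
      simp [List.takeWhile, hb, h2]
      omega

-- the found prefix: numbers[:idx] is the takeWhile prefix
theorem pv_take_takeWhile (t : Int) (xs : List Int) :
    PySem.List.slice xs none (some ((xs.takeWhile (fun v => !(v == t))).length : Int)) =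
      xs.takeWhile (fun v => !(v == t)) := by
  rw [PySem.List.slice_to_natCast]
  exact (List.prefix_iff_eq_take.mp (List.takeWhile_prefix (l := xs) _)).symm

-- the two search/format halves agree
theorem pv_log_eq (xs : List Int) (t : Int) : linear_search_steps xs t = pvSearchLog xs t := by
  unfold linear_search_steps pvSearchLog
  rw [pv_loop_eq t xs 0 []]
  cases hf : (PySem.List.enumerate xs 0).find? (fun p => p.2 == t) with
  | none => simp
  | some p =>
      obtain ⟨h1, h2⟩ := pv_find_enum t xs 0 p hf
      simp only [Option.map_some]
      have h2' : p.1 = ((xs.takeWhile (fun v => !(v == t))).length : Int) := by omega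
      rw [h2', pv_take_takeWhile]
      simp

-- ===== VERDICT (by name: the statement is the Claim_ definition above) =====
theorem run_linear_search_spec : Claim_equal_run_linear_search := by
  intro list_str target_str _
  unfold Spec_run_linear_search run_linear_search run_linear_search_alt
  cases pvParseInts (((PySem.Str.split? list_str ",").getD [])) with
  | none => rfl
  | some numbers =>
    simp only
    split
    · rfl
    · cases PySem.Int.ofStr? (PySem.Str.strip target_str) with
      | none => rfl
      | some t => exact pv_log_eq numbers t
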